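-- pv_equiv track=rewrite | github.com/alesbolka/advent2020 | tasks/day06/day06_functions.py | count_total_sum
-- ===== SOURCE A (Python) =====
-- def count_total_sum(raw_input):
--   res = 0
--   group_str = ""
--   for row in raw_input:
--     group_str += row
--     if len(row) < 1:
--       res += len(set(group_str))
--       group_str = ""
--
--   if len(group_str) > 0:
--     res += len(set(group_str))
--
--   return res
-- ===== SOURCE B (Python) =====
-- def count_total_sum(raw_input):
--     # Index-based run scan: skip blank rows, find each maximal run of
--     # non-empty rows, count distinct characters of the joined run.
--     total = 0
--     i = 0
--     n = len(raw_input)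
--     while i < n:
--         if len(raw_input[i]) < 1:
--             i += 1
--             continue
--         j = i
--         while j < n and len(raw_input[j]) > 0:
--             j += 1
--         total += len(set("".join(raw_input[i:j])))
--         i = j
--     return total
-- ===== Notes on version B (the rewrite author's own statement) =====
-- stated objective: simpler
-- what changed: Replaces the stateful accumulate-and-flush pass (carrying a growing group string and a trailing flush) with an index-based scan over maximal runs of non-empty rows, joining and counting each run directly.
import Mathlib
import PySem

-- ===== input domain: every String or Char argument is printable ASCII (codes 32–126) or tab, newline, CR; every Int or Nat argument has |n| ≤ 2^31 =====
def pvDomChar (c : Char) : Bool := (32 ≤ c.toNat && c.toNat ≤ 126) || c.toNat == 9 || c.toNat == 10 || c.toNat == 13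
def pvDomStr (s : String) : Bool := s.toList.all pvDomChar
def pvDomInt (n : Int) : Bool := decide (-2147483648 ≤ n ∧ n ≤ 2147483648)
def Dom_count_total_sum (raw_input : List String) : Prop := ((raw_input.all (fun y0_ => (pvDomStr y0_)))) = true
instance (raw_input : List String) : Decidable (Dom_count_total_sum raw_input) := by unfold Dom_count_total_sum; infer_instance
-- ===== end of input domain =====

-- B replaces A's accumulate-and-flush pass with a scan over maximal runs of
-- non-empty rows (simpler decomposition; same cost).


-- len(set(s)) for a Python string s
def pvSetLen (s : String) : Int := ((PySem.Set.ofList s.toList).length : Int)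

-- ===== PORT A =====
-- the for-loop of A, carrying (res, group_str); the trailing flush happens at []
def ctsLoop : List String → Int → String → Int
  | [], res, group_str =>
      if PySem.Str.len group_str > 0 then res + pvSetLen group_str else res
  | row :: rest, res, group_str =>
      let g := group_str ++ row
      if PySem.Str.len row < 1 then ctsLoop rest (res + pvSetLen g) ""
      else ctsLoop rest res g

def count_total_sum (raw_input : List String) : Int := ctsLoop raw_input 0 ""

-- ===== PORT B =====
-- non-empty predicate for a row (the inner `while j` condition)
def pvNonEmpty (s : String) : Bool := PySem.Str.len s > 0

-- the outer while-loop of B: skip blank rows; carve out each maximal run of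
-- non-empty rows (takeWhile = the inner `while j` scan, dropWhile = `i = j`)
def ctsRuns : List String → List (List String)
  | [] => []
  | r :: rest =>
      if PySem.Str.len r < 1 then ctsRuns rest
      else (r :: rest.takeWhile pvNonEmpty) :: ctsRuns (rest.dropWhile pvNonEmpty)
termination_by xs => xs.length
decreasing_by
  all_goals simp only [List.length_cons]
  · omega
  · have := List.length_dropWhile_le pvNonEmpty rest; omega

def count_total_sum_alt (raw_input : List String) : Int :=
  (ctsRuns raw_input).foldl (fun total run => total + pvSetLen (PySem.Str.join "" run)) 0

-- ===== PRECONDITION & SPEC =====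
def Spec_count_total_sum (raw_input : List String) (out : Int) : Prop := out = count_total_sum_alt raw_input
instance (raw_input : List String) (out : Int) : Decidable (Spec_count_total_sum raw_input out) := by unfold Spec_count_total_sum; infer_instance

-- ===== CLAIM (what is proved, stated in full; the proofs are below) =====
def Claim_equal_count_total_sum : Prop := ∀ (raw_input : List String), Dom_count_total_sum raw_input → Spec_count_total_sum raw_input (count_total_sum raw_input)

-- ===== LEMMAS AND PROOFS =====

-- equation lemmas for the well-founded ctsRuns
theorem ctsRuns_nil : ctsRuns [] = [] := by rw [ctsRuns]

theorem ctsRuns_cons (r : String) (rest : List String) :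
    ctsRuns (r :: rest) =
      if PySem.Str.len r < 1 then ctsRuns rest
      else (r :: rest.takeWhile pvNonEmpty) :: ctsRuns (rest.dropWhile pvNonEmpty) := by
  rw [ctsRuns]

-- joining with "" concatenates the character lists
theorem pv_join_toList (l : List String) :
    (PySem.Str.join "" l).toList = (l.map String.toList).flatten := by
  rw [PySem.Str.toList_join]
  show PySem.Chars.join [] _ = _
  induction l with
  | nil => simp [PySem.Chars.join_nil]
  | cons a l ih =>
    cases l with
    | nil => simp [PySem.Chars.join_singleton]
    | cons b l' => simpa [PySem.Chars.join_cons_cons] using ih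

-- pvSetLen only depends on the character list
theorem pvSetLen_congr {s t : String} (h : s.toList = t.toList) :
    pvSetLen s = pvSetLen t := by
  unfold pvSetLen; rw [h]

theorem pvSetLen_empty_toList {s : String} (h : s.toList = []) : pvSetLen s = 0 := by
  unfold pvSetLen; rw [h]; rfl

-- B's total as a sum over the runs
theorem pv_alt_foldl (a : Int) (l : List (List String)) :
    l.foldl (fun total run => total + pvSetLen (PySem.Str.join "" run)) a
      = a + (l.map (fun run => pvSetLen (PySem.Str.join "" run))).sum := by
  induction l generalizing a with
  | nil => simp
  | cons x l ih => simp [List.foldl_cons, ih]; ring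

def pvRunSum (xs : List String) : Int :=
  ((ctsRuns xs).map (fun run => pvSetLen (PySem.Str.join "" run))).sum

theorem pv_alt_eq (xs : List String) : count_total_sum_alt xs = pvRunSum xs := by
  unfold count_total_sum_alt pvRunSum
  rw [pv_alt_foldl]; ring

-- A's accumulator shifts out of the loop
theorem ctsLoop_shift (xs : List String) (res : Int) (g : String) :
    ctsLoop xs res g = res + ctsLoop xs 0 g := by
  induction xs generalizing res g with
  | nil => simp only [ctsLoop]; split_ifs <;> ring
  | cons r rest ih =>
    simp only [ctsLoop]
    split_ifs with h
    · rw [ih, ih (0 + _)]; ring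
    · rw [ih res, ih 0]

-- the core invariant: the loop with carried group g computes the run sums of
-- xs with g (if non-empty) prepended to the first run
theorem ctsLoop_runs (xs : List String) (g : String) :
    ctsLoop xs 0 g = pvRunSum (if g.toList.length = 0 then xs else g :: xs) := by
  induction xs generalizing g with
  | nil =>
    by_cases hg : g.toList.length = 0
    · rw [if_pos hg]
      simp only [ctsLoop]
      rw [if_neg (by rw [PySem.Str.len_eq]; omega)]
      simp [pvRunSum, ctsRuns_nil]
    · rw [if_neg hg]
      simp only [ctsLoop]
      rw [if_pos (by rw [PySem.Str.len_eq]; omega)]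
      unfold pvRunSum
      rw [ctsRuns_cons, if_neg (by rw [PySem.Str.len_eq]; omega)]
      simp only [List.takeWhile_nil, List.dropWhile_nil, ctsRuns_nil,
        List.map_cons, List.map_nil, List.sum_cons, List.sum_nil]
      have : pvSetLen (PySem.Str.join "" [g]) = pvSetLen g :=
        pvSetLen_congr (by rw [pv_join_toList]; simp)
      rw [this]; ring
  | cons r rest ih =>
    by_cases hr : r.toList.length = 0
    · -- blank row: flush
      have hrlen : PySem.Str.len r < 1 := by rw [PySem.Str.len_eq]; omega
      have hgr : (g ++ r).toList = g.toList := by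
        rw [String.toList_append, List.length_eq_zero_iff.mp hr, List.append_nil]
      have hpr : pvNonEmpty r = false := by
        unfold pvNonEmpty
        simp only [PySem.Str.len_eq, gt_iff_lt, decide_eq_false_iff_not]
        omega
      have hloop : ctsLoop (r :: rest) 0 g = pvSetLen g + ctsLoop rest 0 "" := by
        simp only [ctsLoop]
        rw [if_pos hrlen, ctsLoop_shift, pvSetLen_congr hgr]; ring
      rw [hloop, ih "", if_pos (by rfl)]
      by_cases hg : g.toList.length = 0
      · rw [if_pos hg, pvSetLen_empty_toList (List.length_eq_zero_iff.mp hg)]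
        unfold pvRunSum
        rw [ctsRuns_cons, if_pos hrlen]
        ring
      · rw [if_neg hg]
        unfold pvRunSum
        rw [ctsRuns_cons, if_neg (by rw [PySem.Str.len_eq]; omega),
          List.takeWhile_cons_of_neg (by simp [hpr]),
          List.dropWhile_cons_of_neg (by simp [hpr]),
          ctsRuns_cons, if_pos hrlen]
        simp only [List.map_cons, List.sum_cons]
        have : pvSetLen (PySem.Str.join "" [g]) = pvSetLen g :=
          pvSetLen_congr (by rw [pv_join_toList]; simp)
        rw [this]
    · -- non-empty row: extend the group
      have hrlen : ¬ PySem.Str.len r < 1 := by rw [PySem.Str.len_eq]; omega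
      have hloop : ctsLoop (r :: rest) 0 g = ctsLoop rest 0 (g ++ r) := by
        simp only [ctsLoop]; rw [if_neg hrlen]
      have hgr : ¬ ((g ++ r).toList.length = 0) := by
        rw [String.toList_append, List.length_append]; omega
      have hgrlen : ¬ PySem.Str.len (g ++ r) < 1 := by rw [PySem.Str.len_eq]; omega
      have hpr : pvNonEmpty r = true := by
        unfold pvNonEmpty
        simp only [PySem.Str.len_eq, gt_iff_lt, decide_eq_true_eq]
        omega
      rw [hloop, ih (g ++ r), if_neg hgr]
      by_cases hg : g.toList.length = 0
      · rw [if_pos hg]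
        have hge : g.toList = [] := List.length_eq_zero_iff.mp hg
        unfold pvRunSum
        rw [ctsRuns_cons, if_neg hgrlen, ctsRuns_cons, if_neg hrlen]
        simp only [List.map_cons, List.sum_cons]
        congr 1
        apply pvSetLen_congr
        rw [pv_join_toList, pv_join_toList]
        simp [String.toList_append, hge]
      · rw [if_neg hg]
        unfold pvRunSum
        rw [ctsRuns_cons, if_neg hgrlen, ctsRuns_cons,
          if_neg (by rw [PySem.Str.len_eq]; omega),
          List.takeWhile_cons_of_pos hpr, List.dropWhile_cons_of_pos hpr]
        simp only [List.map_cons, List.sum_cons]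
        congr 1
        apply pvSetLen_congr
        rw [pv_join_toList, pv_join_toList]
        simp [String.toList_append]

-- ===== VERDICT (by name: the statement is the Claim_ definition above) =====
theorem count_total_sum_spec : Claim_equal_count_total_sum := by
  intro raw_input _
  unfold Spec_count_total_sum count_total_sum
  rw [pv_alt_eq, ctsLoop_runs, if_pos (by rfl)]
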